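-- pv_equiv track=rewrite | github.com/GizawAAiT/Codeforces | B_Choosing_Cubes.py | solve
-- ===== SOURCE A (Python) =====
-- def solve(n: int, f: int, k: int, a: list[int]) -> str:
--     reference = a[f-1]
--     greater_than_f, greater_or_equal_f = 0, 0
--     for ai in a:
--         greater_than_f += ai > reference
--         greater_or_equal_f += ai >= reference
--
--     # we remove the largest k cubes and if the reference removed, return "YES":
--     if greater_or_equal_f <= k:
--         return 'YES'
--
--     if greater_than_f >= k:
--         return 'NO'
--
--     return "MAYBE"
-- ===== SOURCE B (Python) =====
-- def solve(n: int, f: int, k: int, a: list[int]) -> str: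
--     v = a[f-1]
--     m = len(a)
--     if k >= m:
--         return 'YES'
--     if k <= 0:
--         return 'NO'
--     t = sorted(a)
--     if t[m-1-k] < v:
--         return 'YES'
--     if t[m-k] > v:
--         return 'NO'
--     return 'MAYBE'
-- ===== Notes on version B (the rewrite author's own statement) =====
-- stated objective: alternative
-- what changed: Replaces the two running comparison counters with a sort: after ordering the cubes ascending, the answer is read off from the two boundary elements t[m-1-k] and t[m-k] of the removed top-k block, plus the trivial k>=m / k<=0 cases.
import Mathlib
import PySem

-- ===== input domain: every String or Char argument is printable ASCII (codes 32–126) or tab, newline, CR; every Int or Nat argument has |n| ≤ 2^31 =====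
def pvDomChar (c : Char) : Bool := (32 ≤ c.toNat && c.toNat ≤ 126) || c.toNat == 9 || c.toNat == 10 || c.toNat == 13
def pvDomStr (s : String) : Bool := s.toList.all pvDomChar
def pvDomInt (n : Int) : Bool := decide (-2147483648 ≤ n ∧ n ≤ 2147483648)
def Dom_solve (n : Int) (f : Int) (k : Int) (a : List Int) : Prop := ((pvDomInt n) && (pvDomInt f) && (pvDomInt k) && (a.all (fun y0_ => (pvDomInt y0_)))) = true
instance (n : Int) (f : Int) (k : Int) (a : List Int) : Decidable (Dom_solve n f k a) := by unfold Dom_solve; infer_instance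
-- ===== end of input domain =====

-- B replaces A's two running comparison counters with a sort: the answer is read off
-- the two boundary elements of the removed top-k block of sorted(a) (objective: alternative).

-- ===== PORT A =====
def solve (n : Int) (f : Int) (k : Int) (a : List Int) : String :=
  let reference := PySem.List.pyGetD a (f - 1) 0
  let p := a.foldl
    (fun (acc : Int × Int) ai =>
      (acc.1 + (if reference < ai then 1 else 0),
       acc.2 + (if reference ≤ ai then 1 else 0))) (0, 0)
  if p.2 ≤ k then "YES"
  else if k ≤ p.1 then "NO"
  else "MAYBE"

-- ===== PORT B =====
def solve_alt (n : Int) (f : Int) (k : Int) (a : List Int) : String :=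
  let v := PySem.List.pyGetD a (f - 1) 0
  let m : Int := a.length
  if m ≤ k then "YES"
  else if k ≤ 0 then "NO"
  else
    let t := PySem.List.sorted a (fun x => x) false
    if PySem.List.pyGetD t (m - 1 - k) 0 < v then "YES"
    else if v < PySem.List.pyGetD t (m - k) 0 then "NO"
    else "MAYBE"

-- ===== PRECONDITION & SPEC =====
-- Pre_: exactly the inputs where Python's a[f-1] does not raise IndexError.
def Pre_solve (n : Int) (f : Int) (k : Int) (a : List Int) : Prop :=
  PySem.Raise.InRange a.length (f - 1)
instance (n : Int) (f : Int) (k : Int) (a : List Int) : Decidable (Pre_solve n f k a) := by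
  unfold Pre_solve; infer_instance

def pvWitness_solve : Int × Int × Int × List Int := (3, 1, 1, [3, 2, 1])

def Spec_solve (n : Int) (f : Int) (k : Int) (a : List Int) (out : String) : Prop := out = solve_alt n f k a
instance (n : Int) (f : Int) (k : Int) (a : List Int) (out : String) : Decidable (Spec_solve n f k a out) := by unfold Spec_solve; infer_instance

-- ===== CLAIM (what is proved, stated in full; the proofs are below) =====
def Claim_equal_solve : Prop := ∀ (n : Int) (f : Int) (k : Int) (a : List Int), Dom_solve n f k a → Pre_solve n f k a → Spec_solve n f k a (solve n f k a)

-- ===== LEMMAS AND PROOFS =====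

-- A's loop computes the two comparison counts.
theorem solve_foldl_counts (v : Int) (a : List Int) (x y : Int) :
    a.foldl
      (fun (acc : Int × Int) ai =>
        (acc.1 + (if v < ai then 1 else 0),
         acc.2 + (if v ≤ ai then 1 else 0))) (x, y)
    = (x + (a.countP (fun ai => v < ai) : Int), y + (a.countP (fun ai => v ≤ ai) : Int)) := by
  induction a generalizing x y with
  | nil => simp
  | cons h tl ih =>
      simp only [List.foldl_cons, List.countP_cons, ih]
      by_cases h1 : v < h
      · have h2 : v ≤ h := le_of_lt h1
        simp only [h1, h2, if_true, decide_true, Prod.mk.injEq]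
        constructor <;> push_cast <;> ring
      · by_cases h2 : v ≤ h
        · simp only [h1, h2, if_true, if_false, decide_true, decide_false, Prod.mk.injEq]
          constructor <;> push_cast <;> ring
        · simp only [h1, h2, if_false, decide_false, Prod.mk.injEq]
          constructor <;> push_cast <;> ring

-- In an ascending list, an upward-closed predicate holds at index i iff at least
-- (length - i) elements satisfy it.
theorem count_upClosed_at_index (p : Int → Bool)
    (hup : ∀ x y : Int, x ≤ y → p x = true → p y = true)
    (t : List Int) (hs : t.Pairwise (fun x y => x ≤ y)) (i : Nat) (hi : i < t.length) :
    (p t[i] = true ↔ t.length - i ≤ t.countP p) := by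
  have hpg := List.pairwise_iff_getElem.1 hs
  constructor
  · intro hp
    have hsplit : t.countP p = (t.take i).countP p + (t.drop i).countP p := by
      rw [← List.countP_append, List.take_append_drop]
    have hall : ∀ x ∈ t.drop i, p x = true := by
      intro x hx
      obtain ⟨j, hj, hxe⟩ := List.mem_iff_getElem.1 hx
      have hj' : i + j < t.length := by
        simp only [List.length_drop] at hj; omega
      rw [List.getElem_drop] at hxe
      subst hxe
      rcases Nat.eq_zero_or_pos j with h | h
      · subst h; simpa using hp
      · exact hup _ _ (hpg i (i + j) hi hj' (by omega)) hp
    have : (t.drop i).countP p = (t.drop i).length := List.countP_eq_length.2 hall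
    rw [hsplit, this, List.length_drop]
    omega
  · intro hc
    by_contra hp
    have hpf : p t[i] = false := by
      cases h : p t[i] with
      | true => exact absurd h hp
      | false => rfl
    have hsplit : t.countP p = (t.take (i+1)).countP p + (t.drop (i+1)).countP p := by
      rw [← List.countP_append, List.take_append_drop]
    have hnone : ∀ x ∈ t.take (i+1), ¬ p x = true := by
      intro x hx
      obtain ⟨j, hj, hxe⟩ := List.mem_iff_getElem.1 hx
      rw [List.getElem_take] at hxe
      subst hxe
      intro hpx
      have hji : j ≤ i := by
        have := hj
        simp only [List.length_take] at this
        omega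
      rcases Nat.eq_or_lt_of_le hji with h | h
      · subst h; exact hp hpx
      · have hjl : j < t.length := by omega
        exact hp (hup _ _ (hpg j i hjl hi h) hpx)
    have hz : (t.take (i+1)).countP p = 0 :=
      List.countP_eq_zero.2 (fun x hx => by simpa using hnone x hx)
    have hle : (t.drop (i+1)).countP p ≤ (t.drop (i+1)).length := List.countP_le_length
    rw [hsplit, hz] at hc
    simp only [List.length_drop] at hle
    omega

-- ===== VERDICT (by name: the statement is the Claim_ definition above) =====
theorem solve_spec : Claim_equal_solve := by
  intro n f k a _ hpre
  unfold Spec_solve solve solve_alt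
  simp only []
  set v := PySem.List.pyGetD a (f - 1) 0 with hv
  rw [solve_foldl_counts]
  have hpre' : PySem.Raise.InRange a.length (f - 1) := hpre
  have hvmem : v ∈ a := PySem.List.pyGetD_mem a 0 hpre'
  have hlen : 0 < a.length := List.length_pos_iff.2 (by rintro rfl; simp at hvmem)
  set t := PySem.List.sorted a (fun x => x) false with ht
  have hperm : t.Perm a := PySem.List.sorted_perm a (fun x => x) false
  have hpair : t.Pairwise (fun x y => x ≤ y) := by
    have := PySem.List.sorted_pairwise a (fun x => x)
    simpa using this
  have hlt : t.length = a.length := hperm.length_eq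
  have hcgt : t.countP (fun ai => v < ai) = a.countP (fun ai => v < ai) := hperm.countP_eq _
  have hcge : t.countP (fun ai => v ≤ ai) = a.countP (fun ai => v ≤ ai) := hperm.countP_eq _
  have hge1 : 1 ≤ a.countP (fun ai => v ≤ ai) :=
    List.countP_pos_iff.2 ⟨v, hvmem, by simp⟩
  by_cases hk1 : (a.length : Int) ≤ k
  · -- k ≥ m: both YES
    have : (a.countP (fun ai => v ≤ ai) : Int) ≤ k :=
      le_trans (by exact_mod_cast (List.countP_le_length : a.countP (fun ai => v ≤ ai) ≤ a.length)) hk1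
    simp [hk1, this]
  · by_cases hk0 : k ≤ 0
    · -- k ≤ 0: A takes the NO branch (geq ≥ 1 > k, gt ≥ 0 ≥ k)
      have h1 : ¬ ((0 : Int) + (a.countP (fun ai => v ≤ ai) : Int) ≤ k) := by
        have : (1 : Int) ≤ (a.countP (fun ai => v ≤ ai) : Int) := by exact_mod_cast hge1
        omega
      have h2 : k ≤ (0 : Int) + (a.countP (fun ai => v < ai) : Int) := by
        have := Int.natCast_nonneg (a.countP (fun ai => decide (v < ai)))
        omega
      simp only [zero_add] at h1 h2
      simp [hk1, hk0, h1, h2]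
    · -- 0 < k < m: read the two boundary elements of sorted a
      have hkpos : 0 < k := by omega
      have hkm : k < (a.length : Int) := by omega
      -- index i₁ = m-1-k for the YES test
      have hi1 : ((a.length : Int) - 1 - k).toNat < t.length := by rw [hlt]; omega
      have hg1 : PySem.List.pyGetD t ((a.length : Int) - 1 - k) 0
          = t[((a.length : Int) - 1 - k).toNat] :=
        PySem.List.pyGetD_eq_getElem t 0 (by omega) (by rw [hlt]; push_cast; omega)
      have hi2 : ((a.length : Int) - k).toNat < t.length := by rw [hlt]; omega
      have hg2 : PySem.List.pyGetD t ((a.length : Int) - k) 0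
          = t[((a.length : Int) - k).toNat] :=
        PySem.List.pyGetD_eq_getElem t 0 (by omega) (by rw [hlt]; push_cast; omega)
      have hYES := count_upClosed_at_index (fun ai => decide (v ≤ ai))
        (fun x y hxy hx => by simp_all; omega) t hpair _ hi1
      have hNO := count_upClosed_at_index (fun ai => decide (v < ai))
        (fun x y hxy hx => by simp_all; omega) t hpair _ hi2
      simp only [decide_eq_true_eq] at hYES hNO
      -- translate the index facts into the count comparisons A makes
      have hYES' : (t[((a.length : Int) - 1 - k).toNat] < v)
          ↔ ((0 : Int) + (a.countP (fun ai => v ≤ ai) : Int) ≤ k) := by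
        rw [← not_le, hYES, hcge, hlt]
        constructor
        · intro h
          have : ¬ (a.length - ((a.length : Int) - 1 - k).toNat ≤ a.countP (fun ai => v ≤ ai)) := h
          have hnk : ((a.length : Int) - 1 - k).toNat = a.length - 1 - k.toNat := by omega
          omega
        · intro h hh
          have hnk : ((a.length : Int) - 1 - k).toNat = a.length - 1 - k.toNat := by omega
          omega
      have hNO' : (v < t[((a.length : Int) - k).toNat])
          ↔ (k ≤ (0 : Int) + (a.countP (fun ai => v < ai) : Int)) := by
        rw [hNO, hcgt, hlt]
        have hnk : ((a.length : Int) - k).toNat = a.length - k.toNat := by omega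
        constructor <;> intro h <;> omega
      simp only [zero_add] at hYES' hNO'
      simp only [hk1, if_false, hk0, if_false, hg1, hg2]
      by_cases hY : t[((a.length : Int) - 1 - k).toNat] < v
      · simp [hY, hYES'.1 hY]
      · have hnY := (not_iff_not.2 hYES').1 hY
        by_cases hN : v < t[((a.length : Int) - k).toNat]
        · simp [hY, hN, hnY, hNO'.1 hN]
        · have hnN := (not_iff_not.2 hNO').1 hN
          simp [hY, hN, hnY, hnN]
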